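-- pv_equiv track=rewrite | github.com/riverscornelson/knowledge-pipeline | scripts/migrate_to_prompt_aware_formatter.py | _identify_improvements
-- ===== SOURCE A (Python) =====
-- from typing import Dict, Any, List
--
-- def _identify_improvements(old_blocks: List[Dict], new_blocks: List[Dict]) -> List[str]:
--     """Identify improvements in the new formatter."""
--     improvements = []
--
--     # Check for visual hierarchy improvements
--     old_headings = sum(1 for b in old_blocks if "heading" in b.get("type", ""))
--     new_headings = sum(1 for b in new_blocks if "heading" in b.get("type", ""))
--
--     if new_headings > old_headings:
--         improvements.append(f"Better visual hierarchy (+{new_headings - old_headings} headings)")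
--
--     # Check for callout usage
--     old_callouts = sum(1 for b in old_blocks if b.get("type") == "callout")
--     new_callouts = sum(1 for b in new_blocks if b.get("type") == "callout")
--
--     if new_callouts > old_callouts:
--         improvements.append(f"Enhanced visual elements (+{new_callouts - old_callouts} callouts)")
--
--     # Check for toggles (better organization)
--     old_toggles = sum(1 for b in old_blocks if b.get("type") == "toggle")
--     new_toggles = sum(1 for b in new_blocks if b.get("type") == "toggle")
--
--     if new_toggles > old_toggles:
--         improvements.append(f"Better content organization (+{new_toggles - old_toggles} toggles)")
--
--     return improvements
-- ===== SOURCE B (Python) =====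
-- def _identify_improvements(old_blocks, new_blocks):
--     """Identify improvements via a frequency table of block types per list."""
--     def type_counts(blocks):
--         counts = {}
--         for b in blocks:
--             ty = b.get("type", "")
--             counts[ty] = counts.get(ty, 0) + 1
--         return counts
--
--     old_counts = type_counts(old_blocks)
--     new_counts = type_counts(new_blocks)
--
--     def headings(counts):
--         return sum(v for k, v in counts.items() if "heading" in k)
--
--     improvements = []
--     d = headings(new_counts) - headings(old_counts)
--     if d > 0:
--         improvements.append(f"Better visual hierarchy (+{d} headings)")
--     d = new_counts.get("callout", 0) - old_counts.get("callout", 0)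
--     if d > 0:
--         improvements.append(f"Enhanced visual elements (+{d} callouts)")
--     d = new_counts.get("toggle", 0) - old_counts.get("toggle", 0)
--     if d > 0:
--         improvements.append(f"Better content organization (+{d} toggles)")
--     return improvements
-- ===== Notes on version B (the rewrite author's own statement) =====
-- stated objective: alternative
-- what changed: Builds a frequency table (dict) of block types per list in one pass, then derives headings by summing the table's entries whose key contains 'heading' and reads callout/toggle counts by direct dict lookup, instead of A's six independent counting passes over the raw block lists.
import Mathlib
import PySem

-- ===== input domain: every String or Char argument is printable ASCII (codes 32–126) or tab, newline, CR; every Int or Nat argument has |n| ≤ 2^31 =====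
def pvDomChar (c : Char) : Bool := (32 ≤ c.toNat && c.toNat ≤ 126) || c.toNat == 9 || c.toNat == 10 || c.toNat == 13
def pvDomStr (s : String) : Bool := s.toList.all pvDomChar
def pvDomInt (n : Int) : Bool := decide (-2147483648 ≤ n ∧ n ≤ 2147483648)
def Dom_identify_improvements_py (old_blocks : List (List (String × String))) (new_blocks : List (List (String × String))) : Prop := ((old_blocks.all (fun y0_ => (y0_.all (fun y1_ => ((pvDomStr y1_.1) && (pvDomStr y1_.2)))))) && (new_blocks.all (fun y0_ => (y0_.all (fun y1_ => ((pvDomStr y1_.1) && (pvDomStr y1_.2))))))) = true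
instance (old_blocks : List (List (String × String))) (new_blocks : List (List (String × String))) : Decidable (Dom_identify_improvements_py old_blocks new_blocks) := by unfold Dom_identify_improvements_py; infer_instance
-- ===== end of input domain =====

-- B replaces A's six counting passes over the block lists by one frequency table (dict) of block types per list, from which all three counts are read (alternative data-structure decomposition; same O(n) cost).


-- ===== PORT A =====
-- b.get("type", d): first-match lookup in the association list (dict convention)
def pvGetType (b : List (String × String)) (d : String) : String :=
  match b.find? (fun p => p.1 == "type") with
  | some p => p.2
  | none => d

def identify_improvements_py (old_blocks : List (List (String × String))) (new_blocks : List (List (String × String))) : List String :=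
  let improvements : List String := []
  let old_headings : Int := old_blocks.foldl (fun acc b => if PySem.Str.isIn "heading" (pvGetType b "") then acc + 1 else acc) 0
  let new_headings : Int := new_blocks.foldl (fun acc b => if PySem.Str.isIn "heading" (pvGetType b "") then acc + 1 else acc) 0
  let improvements := if new_headings > old_headings then improvements ++ ["Better visual hierarchy (+" ++ PySem.Int.toStr (new_headings - old_headings) ++ " headings)"] else improvements
  let old_callouts : Int := old_blocks.foldl (fun acc b => if pvGetType b "" == "callout" then acc + 1 else acc) 0
  let new_callouts : Int := new_blocks.foldl (fun acc b => if pvGetType b "" == "callout" then acc + 1 else acc) 0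
  let improvements := if new_callouts > old_callouts then improvements ++ ["Enhanced visual elements (+" ++ PySem.Int.toStr (new_callouts - old_callouts) ++ " callouts)"] else improvements
  let old_toggles : Int := old_blocks.foldl (fun acc b => if pvGetType b "" == "toggle" then acc + 1 else acc) 0
  let new_toggles : Int := new_blocks.foldl (fun acc b => if pvGetType b "" == "toggle" then acc + 1 else acc) 0
  let improvements := if new_toggles > old_toggles then improvements ++ ["Better content organization (+" ++ PySem.Int.toStr (new_toggles - old_toggles) ++ " toggles)"] else improvements
  improvements

-- ===== PORT B =====
-- one tabulation pass per list: counts[ty] = counts.get(ty, 0) + 1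
def pvTypeCounts (blocks : List (List (String × String))) : PySem.Dict String Int :=
  blocks.foldl (fun d b =>
    let ty := pvGetType b ""
    d.insert ty (d.getD ty 0 + 1)) PySem.Dict.empty

-- sum(v for k, v in counts.items() if "heading" in k)
def pvHeadings (c : PySem.Dict String Int) : Int :=
  c.items.foldl (fun acc kv => if PySem.Str.isIn "heading" kv.1 then acc + kv.2 else acc) 0

def identify_improvements_py_alt (old_blocks : List (List (String × String))) (new_blocks : List (List (String × String))) : List String :=
  let old_counts := pvTypeCounts old_blocks
  let new_counts := pvTypeCounts new_blocks
  let improvements : List String := []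
  let d1 := pvHeadings new_counts - pvHeadings old_counts
  let improvements := if d1 > 0 then improvements ++ ["Better visual hierarchy (+" ++ PySem.Int.toStr d1 ++ " headings)"] else improvements
  let d2 := new_counts.getD "callout" 0 - old_counts.getD "callout" 0
  let improvements := if d2 > 0 then improvements ++ ["Enhanced visual elements (+" ++ PySem.Int.toStr d2 ++ " callouts)"] else improvements
  let d3 := new_counts.getD "toggle" 0 - old_counts.getD "toggle" 0
  let improvements := if d3 > 0 then improvements ++ ["Better content organization (+" ++ PySem.Int.toStr d3 ++ " toggles)"] else improvements
  improvements

-- ===== PRECONDITION & SPEC =====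
def Spec_identify_improvements_py (old_blocks : List (List (String × String))) (new_blocks : List (List (String × String))) (out : List String) : Prop := out = identify_improvements_py_alt old_blocks new_blocks
instance (old_blocks : List (List (String × String))) (new_blocks : List (List (String × String))) (out : List String) : Decidable (Spec_identify_improvements_py old_blocks new_blocks out) := by unfold Spec_identify_improvements_py; infer_instance

-- ===== CLAIM =====
def Claim_equal_identify_improvements_py : Prop := ∀ (old_blocks : List (List (String × String))) (new_blocks : List (List (String × String))), Dom_identify_improvements_py old_blocks new_blocks → Spec_identify_improvements_py old_blocks new_blocks (identify_improvements_py old_blocks new_blocks)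

-- ===== LEMMAS AND PROOFS =====

-- the dict built by B is the Counter of the list of block types
theorem pvTypeCounts_eq_counter (blocks : List (List (String × String))) :
    pvTypeCounts blocks = PySem.Dict.counter (blocks.map (fun b => pvGetType b "")) := by
  unfold pvTypeCounts
  rw [← PySem.Dict.foldl_insert_getD_add_one_eq_counter, List.foldl_map]

-- a conditional-sum fold equals init + sum of the mapped filtered list
theorem foldl_filter_add {α : Type} (p : α → Bool) (f : α → Int) (l : List α) (init : Int) :
    l.foldl (fun acc x => if p x then acc + f x else acc) init
      = init + ((l.filter p).map f).sum := by
  induction l generalizing init with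
  | nil => simp
  | cons x xs ih =>
    simp only [List.foldl_cons, List.filter_cons]
    by_cases h : p x = true
    · simp [h, ih]; ring
    · simp [h, ih]

-- summing the Counter's entries over keys containing "heading" counts the elements containing "heading"
theorem pvHeadings_counter (xs : List String) :
    pvHeadings (PySem.Dict.counter xs)
      = ((xs.countP (fun s => PySem.Str.isIn "heading" s) : Nat) : Int) := by
  unfold pvHeadings
  rw [PySem.Dict.items_counter, List.foldl_map]
  simp only
  rw [foldl_filter_add (fun k => PySem.Str.isIn "heading" k) (fun k => ((xs.count k : Nat) : Int))]
  have hperm : (PySem.Set.ofList xs : List String).Perm xs.dedup := by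
    apply List.perm_of_nodup_nodup_toFinset_eq (PySem.Set.nodup_ofList xs) xs.nodup_dedup
    ext y
    simp [PySem.Set.mem_ofList]
  have hperm2 := ((hperm.filter (fun k => PySem.Str.isIn "heading" k)).map
      (fun k => ((xs.count k : Nat) : Int))).sum_eq
  rw [hperm2]
  have : ((xs.dedup.filter (fun k => PySem.Str.isIn "heading" k)).map
      (fun k => ((xs.count k : Nat) : Int)))
      = ((xs.dedup.filter (fun k => PySem.Str.isIn "heading" k)).map
      (fun k => (xs.count k : Nat))).map (fun n : Nat => (n : Int)) := by
    simp [List.map_map, Function.comp]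
  rw [this, ← Nat.cast_list_sum, List.sum_map_count_dedup_filter_eq_countP]
  simp

-- A's conditional count over blocks, as a countP of the mapped types
theorem foldl_count_blocks (p : String → Bool) (blocks : List (List (String × String))) :
    blocks.foldl (fun acc b => if p (pvGetType b "") then acc + 1 else acc) (0 : Int)
      = (((blocks.map (fun b => pvGetType b "")).countP p : Nat) : Int) := by
  rw [PySem.List.foldl_count_if (fun b => p (pvGetType b "")) blocks 0, List.countP_map]
  simp only [Function.comp_def]
  norm_num

-- the table lookup for the "heading" sum, stated on B's table directly
theorem pvHeadings_counts (blocks : List (List (String × String))) :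
    pvHeadings (pvTypeCounts blocks)
      = (((blocks.map (fun b => pvGetType b "")).countP (fun s => PySem.Str.isIn "heading" s) : Nat) : Int) := by
  rw [pvTypeCounts_eq_counter, pvHeadings_counter]

-- B's exact-type lookups read the same counts as A's folds
theorem getD_pvTypeCounts (blocks : List (List (String × String))) (v : String) :
    (pvTypeCounts blocks).getD v 0
      = (((blocks.map (fun b => pvGetType b "")).count v : Nat) : Int) := by
  rw [pvTypeCounts_eq_counter, PySem.Dict.getD_counter]

theorem foldl_eq_count (v : String) (blocks : List (List (String × String))) :
    blocks.foldl (fun acc b => if pvGetType b "" == v then acc + 1 else acc) (0 : Int)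
      = (((blocks.map (fun b => pvGetType b "")).count v : Nat) : Int) := by
  rw [foldl_count_blocks (fun s => s == v) blocks]
  simp [List.count]

-- ===== VERDICT =====
theorem identify_improvements_py_spec : Claim_equal_identify_improvements_py := by
  intro old_blocks new_blocks _
  show _ = _
  unfold identify_improvements_py identify_improvements_py_alt
  simp only [pvHeadings_counts, getD_pvTypeCounts,
    foldl_count_blocks (fun s => PySem.Str.isIn "heading" s), foldl_eq_count]
  split_ifs <;> first | rfl | omega
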